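-- pv_equiv track=rewrite | github.com/yangylv/MLS- | grayscale.py | trim_unchanged_segments
-- ===== SOURCE A (Python) =====
-- def trim_unchanged_segments(arr):
--     if len(arr) < 2:
--         return arr  # 如果数组长度小于2，直接返回
--
--     # 找到变化的起点
--     start = 0
--     while start < len(arr) - 1 and arr[start] == arr[start + 1]:
--         start += 1
--
--     # 如果整个数组都是相同的值，直接返回空数组
--     if start == len(arr) - 1:
--         return []
--
--     # 找到变化的终点
--     end = len(arr) - 1
--     while end > 0 and arr[end] == arr[end - 1]:
--         end -= 1
--
--     # 返回变化部分
--     return arr[start + 1:end]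
-- ===== SOURCE B (Python) =====
-- def trim_unchanged_segments(arr):
--     if len(arr) < 2:
--         return arr
--     # Partition the array into maximal runs of consecutive equal values,
--     # then drop the first and last run and flatten the middle.
--     runs = []
--     for x in arr:
--         if runs and runs[-1][-1] == x:
--             runs[-1].append(x)
--         else:
--             runs.append([x])
--     return [v for r in runs[1:-1] for v in r]
-- ===== Notes on version B (the rewrite author's own statement) =====
-- stated objective: alternative
-- what changed: A walks two index-based while loops to find the start/end boundaries and slices; B makes one pass partitioning the array into maximal runs of consecutive equal values and returns the flattened middle runs (runs[1:-1]).
import Mathlib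
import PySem

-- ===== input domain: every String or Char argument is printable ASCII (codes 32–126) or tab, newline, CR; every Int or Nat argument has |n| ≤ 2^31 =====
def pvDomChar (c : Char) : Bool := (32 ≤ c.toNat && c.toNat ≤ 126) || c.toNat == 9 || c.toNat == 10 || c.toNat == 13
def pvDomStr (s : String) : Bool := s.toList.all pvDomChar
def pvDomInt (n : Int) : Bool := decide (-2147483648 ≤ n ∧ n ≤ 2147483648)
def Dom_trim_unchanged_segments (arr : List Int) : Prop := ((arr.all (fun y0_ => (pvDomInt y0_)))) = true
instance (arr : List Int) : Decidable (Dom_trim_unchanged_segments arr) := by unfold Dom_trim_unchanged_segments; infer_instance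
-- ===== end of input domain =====

-- B replaces A's two index-walking while loops by a single-pass partition of the
-- array into maximal runs of equal values, returning the flattened middle runs
-- (objective: alternative decomposition, same O(n) cost).

-- ===== PORT A =====
-- while start < len(arr)-1 and arr[start] == arr[start+1]: start += 1
-- (List.getD is exact for Python's arr[i] here: the loops only read indices 0..len-1)
def aStart (arr : List Int) (start : Nat) : Nat :=
  if _h : start < arr.length - 1 ∧ arr.getD start 0 = arr.getD (start + 1) 0 then
    aStart arr (start + 1)
  else start
termination_by arr.length - 1 - start
decreasing_by omega

-- while end > 0 and arr[end] == arr[end-1]: end -= 1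
def aEnd (arr : List Int) (e : Nat) : Nat :=
  if 0 < e ∧ arr.getD e 0 = arr.getD (e - 1) 0 then aEnd arr (e - 1) else e
termination_by e
decreasing_by omega

def trim_unchanged_segments (arr : List Int) : List Int :=
  if arr.length < 2 then arr
  else
    let start := aStart arr 0
    if start = arr.length - 1 then []
    else
      let e := aEnd arr (arr.length - 1)
      PySem.List.slice arr (some ((start : Int) + 1)) (some ((e : Nat) : Int))

-- ===== PORT B =====
-- loop body: append x to the last run if it continues it, else start a new run
def bStep (runs : List (List Int)) (x : Int) : List (List Int) :=
  if runs ≠ [] ∧ (runs.getLastD []).getLastD 0 = x then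
    runs.dropLast ++ [runs.getLastD [] ++ [x]]
  else runs ++ [[x]]

-- runs = fold of bStep; return [v for r in runs[1:-1] for v in r]
def trim_unchanged_segments_alt (arr : List Int) : List Int :=
  if arr.length < 2 then arr
  else (((arr.foldl bStep []).drop 1).dropLast).flatMap id

-- ===== PRECONDITION & SPEC =====
def Spec_trim_unchanged_segments (arr : List Int) (out : List Int) : Prop := out = trim_unchanged_segments_alt arr
instance (arr : List Int) (out : List Int) : Decidable (Spec_trim_unchanged_segments arr out) := by unfold Spec_trim_unchanged_segments; infer_instance

-- ===== CLAIM (what is proved, stated in full; the proofs are below) =====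
def Claim_equal_trim_unchanged_segments : Prop := ∀ (arr : List Int), Dom_trim_unchanged_segments arr → Spec_trim_unchanged_segments arr (trim_unchanged_segments arr)

-- ===== LEMMAS AND PROOFS =====

-- tail-building view of B's loop: current run r (nonempty), remaining input
def runsAux (r : List Int) : List Int → List (List Int)
  | [] => [r]
  | x :: xs => if r.getLastD 0 = x then runsAux (r ++ [x]) xs else r :: runsAux [x] xs

-- canonical leading-run decomposition
def runsOf (l : List Int) : List (List Int) :=
  match l with
  | [] => []
  | x :: xs => (x :: xs.takeWhile (· == x)) :: runsOf (xs.dropWhile (· == x))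
termination_by l.length
decreasing_by
  have := List.length_dropWhile_le (· == x) xs
  simp; omega

theorem foldl_bStep_eq_runsAux (xs : List Int) : ∀ (pre : List (List Int)) (r : List Int),
    List.foldl bStep (pre ++ [r]) xs = pre ++ runsAux r xs := by
  induction xs with
  | nil => intro pre r; simp [runsAux]
  | cons y ys ih =>
    intro pre r
    simp only [List.foldl_cons, runsAux, bStep]
    by_cases h : r.getLastD 0 = y
    all_goals simp only [List.getLastD_eq_getLast?] at h ⊢
    all_goals rw [show ((pre ++ [r]).getLast?.getD []) = r by simp, List.dropLast_concat]
    · rw [if_pos ⟨by simp, h⟩, if_pos h, ih]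
    · rw [if_neg (by simpa using h), if_neg h]
      have := ih (pre ++ [r]) [y]
      simpa using this

theorem runsAux_eq (xs : List Int) : ∀ (r : List Int) (x : Int),
    runsAux (r ++ [x]) xs = ((r ++ [x]) ++ xs.takeWhile (· == x)) :: runsOf (xs.dropWhile (· == x)) := by
  induction xs with
  | nil => intro r x; simp [runsAux, runsOf]
  | cons y ys ih =>
    intro r x
    simp only [runsAux, List.getLastD_concat]
    by_cases h : x = y
    · subst h
      rw [show (r ++ [x]) ++ [x] = (r ++ [x]) ++ [x] from rfl]
      simp only [if_pos rfl]
      rw [ih (r ++ [x]) x]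
      simp [List.takeWhile_cons]
    · rw [if_neg h]
      have := ih [] y
      simp only [List.nil_append] at this
      rw [this]
      simp [List.takeWhile_cons, List.dropWhile_cons, (by simpa using Ne.symm h : (y == x) = false), runsOf]

theorem bFold_eq_runsOf (x : Int) (xs : List Int) :
    (x :: xs).foldl bStep [] = runsOf (x :: xs) := by
  have h0 : bStep [] x = [[x]] := by simp [bStep]
  have := foldl_bStep_eq_runsAux xs [] [x]
  simp only [List.nil_append] at this
  have h2 := runsAux_eq xs [] x
  simp only [List.nil_append] at h2
  simp [h0, this, h2, runsOf]

theorem headD_eq_head (l : List Int) (h : l ≠ []) : l.headD 0 = l.head h := by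
  cases l with
  | nil => exact absurd rfl h
  | cons y ys => rfl

-- a run of w's before b does not change b's trailing-run length
theorem trail_append (a b : List Int) (w : Int) (ha : ∀ y ∈ a, y = w) (hb : b ≠ [])
    (hh : b.headD 0 ≠ w) :
    ((a ++ b).reverse.takeWhile (· == (a ++ b).getLastD 0)).length
      = (b.reverse.takeWhile (· == b.getLastD 0)).length := by
  have hg : (a ++ b).getLastD 0 = b.getLastD 0 := by
    cases b with
    | nil => exact absurd rfl hb
    | cons y ys =>
      rw [List.getLastD_eq_getLast?, List.getLastD_eq_getLast?, List.getLast?_append,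
          List.getLast?_eq_getLast (l := y :: ys) (by simp)]
      simp
  rw [hg, List.reverse_append, List.takeWhile_append]
  split
  case isTrue hlen =>
    have hself : b.reverse.takeWhile (· == b.getLastD 0) = b.reverse :=
      (List.takeWhile_prefix _).eq_of_length (by simpa using hlen)
    have hall : ∀ x ∈ b.reverse, (x == b.getLastD 0) = true :=
      List.takeWhile_eq_self_iff.mp hself
    have hmem : b.headD 0 ∈ b.reverse := by
      cases b with
      | nil => exact absurd rfl hb
      | cons y ys => simp
    have hgw : b.getLastD 0 ≠ w := by
      intro hcontra
      have h2 := hall _ hmem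
      rw [beq_iff_eq] at h2
      exact hh (h2.trans hcontra)
    have hz : (a.reverse).takeWhile (· == b.getLastD 0) = [] := by
      cases harev : a.reverse with
      | nil => rfl
      | cons z zs =>
        have hz' : z = w := ha z (List.mem_reverse.mp (harev ▸ List.mem_cons_self))
        rw [List.takeWhile_cons,
            if_neg (by intro hc; rw [hz', beq_iff_eq] at hc; exact hgw hc.symm)]
    rw [hz, hself]
    simp
  case isFalse => rfl

-- the trailing run of x::xs equals the trailing run of xs with the leading x-run removed
theorem trail_run (x : Int) (xs : List Int) (hone : xs.dropWhile (· == x) ≠ []) :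
    ((x :: xs).reverse.takeWhile (· == (x :: xs).getLastD 0)).length
      = ((xs.dropWhile (· == x)).reverse.takeWhile
          (· == (xs.dropWhile (· == x)).getLastD 0)).length := by
  have hdecomp : (x :: xs.takeWhile (· == x)) ++ xs.dropWhile (· == x) = x :: xs := by
    simp [List.takeWhile_append_dropWhile]
  have ha : ∀ y ∈ x :: xs.takeWhile (· == x), y = x := by
    intro y hy
    rcases List.mem_cons.mp hy with h | h
    · exact h
    · simpa using List.mem_takeWhile_imp h
  have hh : (xs.dropWhile (· == x)).headD 0 ≠ x := by
    have hfalse := List.head_dropWhile_not (· == x) hone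
    have hhd : (xs.dropWhile (· == x)).headD 0 = (xs.dropWhile (· == x)).head hone :=
      headD_eq_head _ hone
    rw [hhd]
    intro hc
    rw [hc] at hfalse
    simp at hfalse
  rw [← hdecomp]
  exact trail_append _ _ x ha hone hh

-- dropping the last run of l keeps exactly length-minus-trailing-run elements
theorem mid_eq : ∀ (l : List Int), l ≠ [] →
    ((runsOf l).dropLast).flatMap id
      = l.take (l.length - (l.reverse.takeWhile (· == l.getLastD 0)).length)
  | [], hl => absurd rfl hl
  | x :: xs, _hl => by
    rw [runsOf]
    by_cases hone : xs.dropWhile (· == x) = []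
    · rw [hone]
      have hall : ∀ y ∈ xs, (y == x) = true := List.dropWhile_eq_nil_iff.mp hone
      have hglast : (x :: xs).getLastD 0 = x := by
        have hmem := List.getLast_mem (l := x :: xs) (by simp)
        have hx : (x :: xs).getLast (by simp) = x := by
          rcases List.mem_cons.mp hmem with h | h
          · exact h
          · simpa using hall _ h
        rw [List.getLastD_eq_getLast?, List.getLast?_eq_getLast (by simp)]
        simpa using hx
      have hrev : ∀ y ∈ (x :: xs).reverse, (y == x) = true := by
        intro y hy
        rcases List.mem_cons.mp (List.mem_reverse.mp hy) with h | h
        · simp [h]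
        · exact hall _ h
      have hself : (x :: xs).reverse.takeWhile (· == (x :: xs).getLastD 0) = (x :: xs).reverse := by
        rw [hglast]
        exact List.takeWhile_eq_self_iff.mpr hrev
      rw [hself]
      simp [runsOf]
    · have hr : runsOf (xs.dropWhile (· == x)) ≠ [] := by
        cases hd : xs.dropWhile (· == x) with
        | nil => exact absurd hd hone
        | cons z zs => rw [runsOf]; simp
      rw [List.dropLast_cons_of_ne_nil hr, List.flatMap_cons, mid_eq (xs.dropWhile (· == x)) hone]
      rw [trail_run x xs hone]
      have hdecomp : (x :: xs.takeWhile (· == x)) ++ xs.dropWhile (· == x) = x :: xs := by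
        simp [List.takeWhile_append_dropWhile]
      have hT : ((xs.dropWhile (· == x)).reverse.takeWhile
          (· == (xs.dropWhile (· == x)).getLastD 0)).length ≤ (xs.dropWhile (· == x)).length := by
        have := (List.takeWhile_prefix (l := (xs.dropWhile (· == x)).reverse)
          (· == (xs.dropWhile (· == x)).getLastD 0)).length_le
        simpa using this
      conv_rhs => rw [← hdecomp]
      rw [List.take_append,
          List.take_of_length_le (l := x :: xs.takeWhile (· == x))
            (by simp only [List.length_cons, List.length_append]; omega)]
      simp only [id_eq]
      congr 1
      congr 1
      have hsum : (xs.takeWhile (· == x)).length + (xs.dropWhile (· == x)).length = xs.length := by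
        conv_rhs => rw [← List.takeWhile_append_dropWhile (p := (· == x)) (l := xs)]
        rw [List.length_append]
      simp only [List.length_cons, List.length_append]
      conv_rhs => rw [Nat.sub_right_comm, Nat.add_sub_cancel_left]
termination_by l => l.length
decreasing_by
  have := List.length_dropWhile_le (· == x) xs
  simp; omega

theorem aStart_eq (arr : List Int) (s : Nat) (hs : s < arr.length) :
    aStart arr s = s + ((arr.drop (s + 1)).takeWhile (· == arr.getD s 0)).length := by
  rw [aStart]
  split
  case isTrue h =>
    rw [h.2]
    have hd : arr.drop (s + 1) = arr.getD (s + 1) 0 :: arr.drop (s + 1 + 1) := by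
      rw [List.getD_eq_getElem _ _ (by omega)]
      exact List.drop_eq_getElem_cons (by omega)
    rw [aStart_eq arr (s + 1) (by omega), hd, List.takeWhile_cons, if_pos (by simp)]
    simp; omega
  case isFalse h =>
    push_neg at h
    by_cases h1 : s < arr.length - 1
    · have hne := h h1
      have hd : arr.drop (s + 1) = arr.getD (s + 1) 0 :: arr.drop (s + 1 + 1) := by
        rw [List.getD_eq_getElem _ _ (by omega)]
        exact List.drop_eq_getElem_cons (by omega)
      rw [hd, List.takeWhile_cons, if_neg (by simpa using fun e => hne e.symm)]
      simp
    · have hnil : arr.drop (s + 1) = [] := List.drop_eq_nil_of_le (by omega)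
      simp [hnil]
termination_by arr.length - 1 - s

theorem take_rev_cons (arr : List Int) (e : Nat) (he : e < arr.length) :
    (arr.take (e + 1)).reverse = arr.getD e 0 :: (arr.take e).reverse := by
  rw [List.take_add_one, List.getElem?_eq_getElem he, List.getD_eq_getElem _ _ he]
  simp

theorem aEnd_eq (arr : List Int) (e : Nat) (he : e < arr.length) :
    aEnd arr e = (e + 1) - (((arr.take (e + 1)).reverse).takeWhile (· == arr.getD e 0)).length := by
  rw [aEnd]
  split
  case isTrue h =>
    obtain ⟨hpos, heq⟩ := h
    rw [heq, aEnd_eq arr (e - 1) (by omega),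
        take_rev_cons arr e he, List.takeWhile_cons, if_pos (by simpa [List.getD] using heq)]
    have h1 : e - 1 + 1 = e := by omega
    rw [h1]
    simp only [List.length_cons]
    omega
  case isFalse h =>
    push_neg at h
    rw [take_rev_cons arr e he, List.takeWhile_cons, if_pos (by simp)]
    by_cases hpos : 0 < e
    · have hne := h hpos
      have h1 : e - 1 + 1 = e := by omega
      have h2 := take_rev_cons arr (e - 1) (by omega : e - 1 < arr.length)
      rw [h1] at h2
      rw [h2, List.takeWhile_cons, if_neg (by simpa using fun e => hne e.symm)]
      simp
    · have h0 : e = 0 := by omega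
      subst h0
      simp
termination_by e

-- ===== VERDICT (by name: the statement is the Claim_ definition above) =====
theorem trim_unchanged_segments_spec : Claim_equal_trim_unchanged_segments := by
  intro arr _
  unfold Spec_trim_unchanged_segments
  by_cases hlen : arr.length < 2
  · simp [trim_unchanged_segments, trim_unchanged_segments_alt, hlen]
  · obtain ⟨x, xs, rfl⟩ : ∃ x xs, arr = x :: xs := by
      cases arr with
      | nil => simp at hlen
      | cons x xs => exact ⟨x, xs, rfl⟩
    simp only [trim_unchanged_segments, trim_unchanged_segments_alt]
    rw [if_neg hlen, if_neg hlen, bFold_eq_runsOf, runsOf, List.drop_succ_cons, List.drop_zero]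
    have hs : aStart (x :: xs) 0 = (xs.takeWhile (· == x)).length := by
      have := aStart_eq (x :: xs) 0 (by simp)
      simpa using this
    by_cases hone : xs.dropWhile (· == x) = []
    · have hteq : (xs.takeWhile (· == x)).length = xs.length := by
        have := congrArg List.length (List.takeWhile_append_dropWhile (p := (· == x)) (l := xs))
        rw [hone] at this
        simpa using this
      rw [hs, if_pos (by simp [hteq]), hone]
      simp [runsOf]
    · have hsum : (xs.takeWhile (· == x)).length + (xs.dropWhile (· == x)).length = xs.length := by
        conv_rhs => rw [← List.takeWhile_append_dropWhile (p := (· == x)) (l := xs)]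
        rw [List.length_append]
      have hone' : 0 < (xs.dropWhile (· == x)).length := List.length_pos_of_ne_nil hone
      rw [hs, if_neg (by simp only [List.length_cons, Nat.add_sub_cancel]; omega)]
      have he := aEnd_eq (x :: xs) ((x :: xs).length - 1) (by simp)
      rw [show (x :: xs).length - 1 + 1 = (x :: xs).length from by simp] at he
      rw [List.take_length] at he
      have hgd : (x :: xs).getD ((x :: xs).length - 1) 0 = (x :: xs).getLastD 0 := by
        rw [List.getD_eq_getElem?_getD, List.getLastD_eq_getLast?, List.getLast?_eq_getElem?]
      rw [hgd] at he
      rw [he,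
          show (((xs.takeWhile (· == x)).length : Int) + 1)
              = (((xs.takeWhile (· == x)).length + 1 : Nat) : Int) from by push_cast; ring,
          PySem.List.slice_natCast]
      have hdecomp : (x :: xs.takeWhile (· == x)) ++ xs.dropWhile (· == x) = x :: xs := by
        simp [List.takeWhile_append_dropWhile]
      have hdrop : (x :: xs).drop ((xs.takeWhile (· == x)).length + 1) = xs.dropWhile (· == x) := by
        conv_lhs => rw [← hdecomp]
        rw [show (xs.takeWhile (· == x)).length + 1 = (x :: xs.takeWhile (· == x)).length from by
              simp [Nat.add_comm],
            List.drop_left]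
      rw [hdrop, mid_eq _ hone, trail_run x xs hone]
      congr 1
      simp only [List.length_cons]
      omega
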